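-- pv_equiv track=rewrite | github.com/foggy-projects/foggy-odoo-bridge | foggy_mcp/lib/foggy/dataset_model/semantic/inline_expression.py | _find_top_level_as
-- ===== SOURCE A (Python) =====
-- def skip_string_literal(text: str, start: int) -> int:
--     """Given ``text[start]`` is a quote char, return index past the closing quote.
--
--     Treats ``\\`` as an escape so ``'a\\'b'`` is consumed as a single literal.
--     If the literal is unterminated, returns ``len(text)``.
--     """
--     quote = text[start]
--     i = start + 1
--     escaped = False
--     length = len(text)
--     while i < length:
--         ch = text[i]
--         if escaped:
--             escaped = False
--         elif ch == "\\":
--             escaped = True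
--         elif ch == quote:
--             return i + 1
--         i += 1
--     return i
--
-- def _find_top_level_as(expr: str) -> int:
--     depth = 0
--     i = 0
--     length = len(expr)
--     while i < length:
--         ch = expr[i]
--         if ch in ("'", '"'):
--             i = skip_string_literal(expr, i)
--             continue
--         if ch == "(":
--             depth += 1
--         elif ch == ")":
--             depth -= 1
--         elif depth == 0 and expr[i:i + 4].lower() == " as ":
--             return i
--         i += 1
--     return -1
-- ===== SOURCE B (Python) =====
-- def _find_top_level_as(expr: str) -> int:
--     """Staged re-implementation: first annotate the string, then search.
--
--     Stage 1 runs the scanner once over the whole input with no match logic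
--     and no early return, collecting the list of indices the scanner reads at
--     paren depth 0 outside any string literal (quote/paren chars excluded).
--     Stage 2 lowercases the whole string once and returns the first collected
--     index that starts " as "; -1 if none.
--     """
--     eligible = []
--     depth = 0
--     in_string = False
--     quote = "'"  # only read while in_string
--     escaped = False
--     for j, ch in enumerate(expr):
--         if in_string:
--             if escaped:
--                 escaped = False
--             elif ch == "\\":
--                 escaped = True
--             elif ch == quote:
--                 in_string = False
--         elif ch in ("'", '"'):
--             in_string = True
--             quote = ch
--             escaped = False
--         elif ch == "(":
--             depth += 1
--         elif ch == ")":
--             depth -= 1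
--         elif depth == 0:
--             eligible.append(j)
--     low = expr.lower()
--     for j in eligible:
--         if low[j:j + 4] == " as ":
--             return j
--     return -1
-- ===== Notes on version B (the rewrite author's own statement) =====
-- stated objective: alternative
-- what changed: Replaced A's single scan with an inner skip-ahead string helper and inline match-and-return by two staged passes: pass 1 annotates the whole input, collecting the indices read at top level outside string literals (no match logic, no early return); pass 2 lowercases the string once and returns the first collected index where the four-character keyword starts.
import Mathlib
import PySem

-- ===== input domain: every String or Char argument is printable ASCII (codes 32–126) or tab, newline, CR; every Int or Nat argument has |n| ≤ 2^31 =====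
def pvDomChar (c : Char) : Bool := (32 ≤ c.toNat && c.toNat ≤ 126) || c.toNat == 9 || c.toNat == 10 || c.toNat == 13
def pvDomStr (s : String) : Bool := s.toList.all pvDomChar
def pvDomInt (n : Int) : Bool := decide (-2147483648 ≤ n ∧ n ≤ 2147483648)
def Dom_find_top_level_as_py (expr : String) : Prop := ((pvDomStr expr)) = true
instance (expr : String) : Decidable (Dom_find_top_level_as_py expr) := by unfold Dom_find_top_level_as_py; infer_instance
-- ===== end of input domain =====

-- B replaces A's single scan (with its nested skip-ahead string helper and inline
-- match-and-return) by two staged passes: pass 1 collects the top-level indices,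
-- pass 2 searches them against the lowercased string; objective: alternative
-- decomposition, same O(n) cost.

-- ===== PORT A =====
-- skip_string_literal, transliterated: given the suffix AFTER the opening quote and the
-- current 'escaped' flag, returns the number of characters the Python while-loop consumes
-- (so the Python result index is start + 1 + this count; unterminated → the whole suffix).
def pvSkipA (quote : Char) (l : List Char) (escaped : Bool) : Nat :=
  match l with
  | [] => 0
  | ch :: t =>
    if escaped then 1 + pvSkipA quote t false
    else if ch = '\\' then 1 + pvSkipA quote t true
    else if ch = quote then 1
    else 1 + pvSkipA quote t false

-- the while-loop of _find_top_level_as: l is expr.toList.drop i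
def pvLoopA (l : List Char) (i : Nat) (depth : Int) : Int :=
  match h : l with
  | [] => -1
  | ch :: t =>
    if ch = '\'' ∨ ch = '"' then
      let n := pvSkipA ch t false
      pvLoopA (t.drop n) (i + 1 + n) depth
    else if ch = '(' then pvLoopA t (i + 1) (depth + 1)
    else if ch = ')' then pvLoopA t (i + 1) (depth - 1)
    else if depth = 0 ∧ PySem.Chars.lower (l.take 4) = [' ', 'a', 's', ' '] then (i : Int)
    else pvLoopA t (i + 1) depth
termination_by l.length
decreasing_by
  all_goals (simp only [List.length_cons, List.length_drop]; omega)

def find_top_level_as_py (expr : String) : Int :=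
  pvLoopA expr.toList 0 0

-- ===== PORT B =====
-- Stage 1 of Source B: the annotation loop, collecting (in order) every index the scanner
-- reads at depth 0 outside a string literal; no match logic, no early return.
def pvElig (l : List Char) (j : Nat) (depth : Int)
    (inStr : Bool) (quote : Char) (escaped : Bool) : List Nat :=
  match l with
  | [] => []
  | ch :: t =>
    if inStr then
      if escaped then pvElig t (j + 1) depth true quote false
      else if ch = '\\' then pvElig t (j + 1) depth true quote true
      else if ch = quote then pvElig t (j + 1) depth false quote false
      else pvElig t (j + 1) depth true quote false
    else if ch = '\'' ∨ ch = '"' then pvElig t (j + 1) depth true ch false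
    else if ch = '(' then pvElig t (j + 1) (depth + 1) inStr quote escaped
    else if ch = ')' then pvElig t (j + 1) (depth - 1) inStr quote escaped
    else if depth = 0 then j :: pvElig t (j + 1) depth inStr quote escaped
    else pvElig t (j + 1) depth inStr quote escaped

-- Stage 2 of Source B: first collected index where the keyword starts in the lowered string.
-- low[j:j+4] with 0 ≤ j is exactly (low.drop j).take 4 (Python slice clamps at the end).
def pvStage2 (low : List Char) (js : List Nat) : Int :=
  match js with
  | [] => -1
  | j :: rest =>
    if (low.drop j).take 4 = [' ', 'a', 's', ' '] then (j : Int) else pvStage2 low rest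

def find_top_level_as_py_alt (expr : String) : Int :=
  pvStage2 (PySem.Chars.lower expr.toList) (pvElig expr.toList 0 0 false '\'' false)

-- ===== PRECONDITION & SPEC =====
def Spec_find_top_level_as_py (expr : String) (out : Int) : Prop := out = find_top_level_as_py_alt expr
instance (expr : String) (out : Int) : Decidable (Spec_find_top_level_as_py expr out) := by unfold Spec_find_top_level_as_py; infer_instance

-- ===== CLAIM (what is proved, stated in full; the proofs are below) =====
def Claim_equal_find_top_level_as_py : Prop := ∀ (expr : String), Dom_find_top_level_as_py expr → Spec_find_top_level_as_py expr (find_top_level_as_py expr)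

-- ===== LEMMAS AND PROOFS =====

-- Proof intermediary (not a port): A's scan with the string helper inlined as
-- in_string/quote/escaped flags, one state step per character.
def pvLoopB (l : List Char) (i : Nat) (depth : Int)
    (inStr : Bool) (quote : Char) (escaped : Bool) : Int :=
  match l with
  | [] => -1
  | ch :: t =>
    if inStr then
      if escaped then pvLoopB t (i + 1) depth true quote false
      else if ch = '\\' then pvLoopB t (i + 1) depth true quote true
      else if ch = quote then pvLoopB t (i + 1) depth false quote false
      else pvLoopB t (i + 1) depth true quote false
    else if ch = '\'' ∨ ch = '"' then pvLoopB t (i + 1) depth true ch false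
    else if ch = '(' then pvLoopB t (i + 1) (depth + 1) inStr quote escaped
    else if ch = ')' then pvLoopB t (i + 1) (depth - 1) inStr quote escaped
    else if depth = 0 ∧ PySem.Chars.lower ((ch :: t).take 4) = [' ', 'a', 's', ' '] then (i : Int)
    else pvLoopB t (i + 1) depth inStr quote escaped

-- Step 1: the flag machine equals A's loop (outside a string; and inside a string it
-- equals A's loop resumed after the skip helper's jump). Strong induction on length.
lemma pvLoopB_eq_pvLoopA : ∀ (n : Nat) (l : List Char), l.length ≤ n →
    ∀ (i : Nat) (depth : Int) (q : Char) (e : Bool),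
      pvLoopB l i depth false q e = pvLoopA l i depth ∧
      pvLoopB l i depth true q e =
        pvLoopA (l.drop (pvSkipA q l e)) (i + pvSkipA q l e) depth := by
  intro n
  induction n with
  | zero =>
    intro l hl i depth q e
    have : l = [] := List.eq_nil_of_length_eq_zero (Nat.le_zero.mp hl)
    subst this
    constructor <;> simp [pvLoopB, pvLoopA, pvSkipA]
  | succ n ih =>
    intro l hl i depth q e
    match l with
    | [] => constructor <;> simp [pvLoopB, pvLoopA, pvSkipA]
    | ch :: t =>
      have ht : t.length ≤ n := by simp at hl; omega
      have hdrop : ∀ (s : Nat), List.drop (1 + s) (ch :: t) = List.drop s t := by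
        intro s; rw [Nat.add_comm]; rfl
      constructor
      · rw [pvLoopB, pvLoopA]
        simp only [Bool.false_eq_true, if_false]
        by_cases hq : ch = '\'' ∨ ch = '"'
        · simp only [if_pos hq]
          rw [(ih t ht (i + 1) depth ch false).2, ← hdrop (pvSkipA ch t false)]
        · simp only [if_neg hq]
          by_cases hp : ch = '('
          · simp only [if_pos hp]; exact (ih t ht (i + 1) (depth + 1) q e).1
          · simp only [if_neg hp]
            by_cases hc : ch = ')'
            · simp only [if_pos hc]; exact (ih t ht (i + 1) (depth - 1) q e).1
            · simp only [if_neg hc]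
              by_cases hm : depth = 0 ∧ PySem.Chars.lower ((ch :: t).take 4) = [' ', 'a', 's', ' ']
              · simp only [if_pos hm]
              · simp only [if_neg hm]; exact (ih t ht (i + 1) depth q e).1
      · rw [pvLoopB, pvSkipA]
        by_cases he : e = true
        · simp only [if_pos he]
          rw [(ih t ht (i + 1) depth q false).2, hdrop]
          rw [← Nat.add_assoc]; simp
        · have he' : e = false := by cases e <;> simp_all
          subst he'
          simp only [Bool.false_eq_true, if_false]
          by_cases hb : ch = '\\'
          · simp only [if_pos hb]
            rw [(ih t ht (i + 1) depth q true).2, hdrop]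
            rw [← Nat.add_assoc]; simp
          · simp only [if_neg hb]
            by_cases hqc : ch = q
            · simp only [if_pos hqc]
              rw [(ih t ht (i + 1) depth q false).1]
              simp
            · simp only [if_neg hqc]
              rw [(ih t ht (i + 1) depth q false).2, hdrop]
              rw [← Nat.add_assoc]; simp

-- Step 2: the flag machine equals B's staged pair on any suffix l = full.drop i:
-- its inline match test at index i is stage 2's test on the lowered full string.
lemma pvLoopB_eq_staged : ∀ (l : List Char) (full : List Char) (i : Nat),
    l = List.drop i full →
    ∀ (depth : Int) (s : Bool) (q : Char) (e : Bool),
      pvLoopB l i depth s q e =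
        pvStage2 (PySem.Chars.lower full) (pvElig l i depth s q e) := by
  intro l
  induction l with
  | nil => intro full i h depth s q e; simp [pvLoopB, pvElig, pvStage2]
  | cons ch t ih =>
    intro full i h depth s q e
    have ht : t = List.drop (i + 1) full := by
      have : List.drop (i + 1) full = List.drop 1 (List.drop i full) := by
        rw [List.drop_drop]
      rw [this, ← h]; rfl
    have hmatch : PySem.Chars.lower (List.take 4 (ch :: t)) =
        List.take 4 (List.drop i (PySem.Chars.lower full)) := by
      rw [show (ch :: t) = List.drop i full from h]
      simp [PySem.Chars.lower]
    rw [pvLoopB, pvElig]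
    by_cases hs : s = true
    · subst hs
      simp only [if_true]
      by_cases he : e = true
      · subst he; simp only [if_true]; exact ih full (i + 1) ht depth true q false
      · have he' : e = false := by cases e <;> simp_all
        subst he'
        simp only [Bool.false_eq_true, if_false]
        by_cases hb : ch = '\\'
        · simp only [if_pos hb]; exact ih full (i + 1) ht depth true q true
        · simp only [if_neg hb]
          by_cases hqc : ch = q
          · simp only [if_pos hqc]; exact ih full (i + 1) ht depth false q false
          · simp only [if_neg hqc]; exact ih full (i + 1) ht depth true q false
    · have hs' : s = false := by cases s <;> simp_all
      subst hs'
      simp only [Bool.false_eq_true, if_false]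
      by_cases hq : ch = '\'' ∨ ch = '"'
      · simp only [if_pos hq]; exact ih full (i + 1) ht depth true ch false
      · simp only [if_neg hq]
        by_cases hp : ch = '('
        · simp only [if_pos hp]; exact ih full (i + 1) ht (depth + 1) false q e
        · simp only [if_neg hp]
          by_cases hc : ch = ')'
          · simp only [if_pos hc]; exact ih full (i + 1) ht (depth - 1) false q e
          · simp only [if_neg hc]
            by_cases hd : depth = 0
            · simp only [if_pos hd]
              by_cases hm : PySem.Chars.lower ((ch :: t).take 4) = [' ', 'a', 's', ' ']
              · rw [if_pos ⟨hd, hm⟩, pvStage2, if_pos (by rw [← hmatch]; exact hm)]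
              · rw [if_neg (by intro hcon; exact hm hcon.2), pvStage2,
                    if_neg (by rw [← hmatch]; exact hm)]
                exact ih full (i + 1) ht depth false q e
            · rw [if_neg (by intro hcon; exact hd hcon.1),
                  if_neg hd]
              exact ih full (i + 1) ht depth false q e

-- ===== VERDICT (by name: the statement is the Claim_ definition above) =====
theorem find_top_level_as_py_spec : Claim_equal_find_top_level_as_py := by
  intro expr _
  unfold Spec_find_top_level_as_py find_top_level_as_py find_top_level_as_py_alt
  rw [← (pvLoopB_eq_pvLoopA expr.toList.length expr.toList le_rfl 0 0 '\'' false).1]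
  exact pvLoopB_eq_staged expr.toList expr.toList 0 rfl 0 false '\'' false
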